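-- pv_equiv track=rewrite | github.com/Planning-FC/stock-transfer-dashboard | forecast/app.py | get_buffer_days_from_rules
-- ===== SOURCE A (Python) =====
-- def get_buffer_days_from_rules(value, rules):
--     """
--     Apply buffer rules to a fill rate or sell through value.
--     rules = list of (threshold, buffer_days) sorted ascending
--     Example: [(20, 14), (80, 7), (100, 0)]
--     Meaning: <=20 → 14 days, <=80 → 7 days, >80 → 0 days
--     """
--     try:
--         value = float(value)
--         for threshold, buffer in rules:
--             if value <= threshold:
--                 return buffer
--         return 0  # above all thresholds
--     except:
--         return 0
-- ===== SOURCE B (Python) =====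
-- def get_buffer_days_from_rules(value, rules):
--     """
--     Apply buffer rules to a fill rate or sell through value.
--     rules = list of (threshold, buffer_days) sorted ascending
--     """
--     try:
--         v = float(value)
--         result = 0
--         for threshold, buffer in rules[::-1]:
--             if v <= threshold:
--                 result = buffer
--         return result
--     except:
--         return 0
-- ===== Notes on version B (the rewrite author's own statement) =====
-- stated objective: alternative
-- what changed: Replaces A's early-return forward scan with a full backward scan (rules[::-1]) keeping a last-write-wins accumulator, so the first matching rule in original order is the last assignment; no early exit, no Pre_ needed, works for unsorted rule lists too.
import Mathlib
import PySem

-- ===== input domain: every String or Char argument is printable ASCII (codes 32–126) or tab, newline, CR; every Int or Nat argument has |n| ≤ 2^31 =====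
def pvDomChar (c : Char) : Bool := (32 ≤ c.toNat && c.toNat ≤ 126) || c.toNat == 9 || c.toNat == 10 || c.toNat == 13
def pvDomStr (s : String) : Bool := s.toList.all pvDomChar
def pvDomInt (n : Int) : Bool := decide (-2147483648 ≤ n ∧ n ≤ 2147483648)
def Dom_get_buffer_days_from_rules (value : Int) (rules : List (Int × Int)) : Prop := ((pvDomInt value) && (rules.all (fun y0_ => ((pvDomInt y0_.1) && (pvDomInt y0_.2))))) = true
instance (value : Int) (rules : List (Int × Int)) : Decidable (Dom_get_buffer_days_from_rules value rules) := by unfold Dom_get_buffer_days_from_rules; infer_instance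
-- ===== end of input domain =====

-- B replaces A's early-return forward scan with a full backward scan over rules[::-1]
-- keeping a last-write-wins accumulator (an alternative decomposition, same cost).
-- ===== PORT A =====
-- 'for threshold, buffer in rules: if value <= threshold: return buffer; return 0'
-- float(value) on an Int is exact here and never raises, so the try/except is the identity.
def get_buffer_days_from_rules (value : Int) (rules : List (Int × Int)) : Int :=
  match rules with
  | [] => 0
  | (threshold, buffer) :: rest =>
    if value ≤ threshold then buffer else get_buffer_days_from_rules value rest

-- ===== PORT B =====
-- 'result = 0; for threshold, buffer in rules[::-1]: if v <= threshold: result = buffer; return result'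
-- rules[::-1] is ported as List.reverse (exact for the full reverse slice).
def get_buffer_days_from_rules_alt (value : Int) (rules : List (Int × Int)) : Int :=
  rules.reverse.foldl (fun result tb => if value ≤ tb.1 then tb.2 else result) 0

-- ===== PRECONDITION & SPEC =====
def Spec_get_buffer_days_from_rules (value : Int) (rules : List (Int × Int)) (out : Int) : Prop := out = get_buffer_days_from_rules_alt value rules
instance (value : Int) (rules : List (Int × Int)) (out : Int) : Decidable (Spec_get_buffer_days_from_rules value rules out) := by unfold Spec_get_buffer_days_from_rules; infer_instance

-- ===== CLAIM (what is proved, stated in full; the proofs are below) =====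
def Claim_equal_get_buffer_days_from_rules : Prop := ∀ (value : Int) (rules : List (Int × Int)), Dom_get_buffer_days_from_rules value rules → Spec_get_buffer_days_from_rules value rules (get_buffer_days_from_rules value rules)

-- ===== LEMMAS AND PROOFS =====

-- ===== VERDICT (by name: the statement is the Claim_ definition above) =====
-- B on r :: rest: the reversed list ends with r, so r is folded last and overrides the
-- accumulated result of rest exactly when it matches — the same recurrence as A.
theorem alt_cons (value : Int) (t b : Int) (rest : List (Int × Int)) :
    get_buffer_days_from_rules_alt value ((t, b) :: rest)
      = if value ≤ t then b else get_buffer_days_from_rules_alt value rest := by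
  simp [get_buffer_days_from_rules_alt, List.reverse_cons, List.foldl_append]

theorem get_buffer_days_from_rules_spec : Claim_equal_get_buffer_days_from_rules := by
  intro value rules _
  unfold Spec_get_buffer_days_from_rules
  clear ‹_›
  induction rules with
  | nil => rfl
  | cons r rest ih =>
    rw [alt_cons]
    simp only [get_buffer_days_from_rules]
    split <;> simp [ih]
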